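-- pv_equiv track=rewrite | github.com/courtneyfugate-ctrl/logic-miner-engine | sandbox/skeptical_investigation_v3.py | reconstruct_lineage
-- ===== SOURCE A (Python) =====
-- def reconstruct_lineage(addr, p=48):
--     lineage = []
--     val = addr - 1
--     # BFE: addr = 1 + c1*p^1 + c2*p^2 + ...
--     # So (addr-1) in base p has digits [0, c1, c2, ...]
--
--     coeffs = []
--     temp = val
--     if temp == 0:
--         return [1]
--
--     while temp > 0:
--         coeffs.append(temp % p)
--         temp //= p
--
--     # Prefix Reconstruction
--     current = 1
--     lineage.append(current)
--     # coeffs[0] corresponds to p^0, which should be 0 in BFE if root is at depth 0.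
--     # Actually, root is depth 0, children are depth 1.
--     # Grandchild at depth 2 is 1 + c1*p^1 + c2*p^2
--     for i, c in enumerate(coeffs):
--         if i == 0: continue # Skip p^0 term
--         current += c * (p**i)
--         lineage.append(current)
--
--     return lineage
-- ===== SOURCE B (Python) =====
-- def reconstruct_lineage(addr, p=48):
--     # Modular-truncation form: the ancestor at depth i is 1 - (val % p) + (val % p**(i+1)),
--     # so no digit list is needed.
--     val = addr - 1
--     if val <= 0:
--         return [1]
--     c0 = val % p
--     lineage = [1]
--     i = 1
--     while val // p**i > 0:
--         lineage.append(1 - c0 + val % p**(i + 1))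
--         i += 1
--     return lineage
-- ===== Notes on version B (the rewrite author's own statement) =====
-- stated objective: simpler
-- what changed: Instead of extracting a base-p digit list and then accumulating digit contributions in a second enumerate loop, B computes each lineage entry directly as 1 - (val % p) + (val % p**(i+1)) by modular truncation in a single loop.
import Mathlib
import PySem

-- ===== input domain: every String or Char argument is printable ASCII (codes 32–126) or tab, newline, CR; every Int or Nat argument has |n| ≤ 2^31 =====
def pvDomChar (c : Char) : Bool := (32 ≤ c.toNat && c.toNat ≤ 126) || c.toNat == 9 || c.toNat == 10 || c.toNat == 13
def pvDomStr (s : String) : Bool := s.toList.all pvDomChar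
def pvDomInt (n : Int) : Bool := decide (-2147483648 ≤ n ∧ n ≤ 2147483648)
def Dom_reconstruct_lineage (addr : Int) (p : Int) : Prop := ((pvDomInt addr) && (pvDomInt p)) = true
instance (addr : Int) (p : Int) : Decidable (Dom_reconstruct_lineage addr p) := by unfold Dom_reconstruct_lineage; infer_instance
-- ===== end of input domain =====

-- B replaces A's two-phase digit-list extraction + enumerate accumulation by a single loop
-- computing each lineage entry directly as 1 - (val % p) + (val % p^(i+1)) (simpler decomposition).


-- ===== PORT A =====
-- A's `while temp > 0` digit loop; fuel only makes the recursion total (val.toNat + 1 suffices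
-- whenever the Python loop terminates, i.e. on Pre_).
def pvDigitsA (p : Int) : Nat → Int → List Int
  | 0, _ => []
  | fuel + 1, temp =>
    if temp > 0 then PySem.Int.mod temp p :: pvDigitsA p fuel (PySem.Int.floordiv temp p)
    else []

-- A's `for i, c in enumerate(coeffs)` loop, index carried explicitly.
def pvALoop (p : Int) : List Int → Nat → Int → List Int → List Int
  | [], _, _, lineage => lineage
  | c :: rest, i, current, lineage =>
    if i = 0 then pvALoop p rest (i + 1) current lineage
    else pvALoop p rest (i + 1) (current + c * p ^ i) (lineage ++ [current + c * p ^ i])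

def reconstruct_lineage (addr : Int) (p : Int) : List Int :=
  let val := addr - 1
  if val = 0 then [1]
  else pvALoop p (pvDigitsA p (val.toNat + 1) val) 0 1 [1]

-- ===== PORT B =====
-- B's `while val // p**i > 0` loop; fuel only makes the recursion total.
def pvBLoop (val c0 p : Int) : Nat → Nat → List Int
  | 0, _ => []
  | fuel + 1, i =>
    if PySem.Int.floordiv val (p ^ i) > 0 then
      (1 - c0 + PySem.Int.mod val (p ^ (i + 1))) :: pvBLoop val c0 p fuel (i + 1)
    else []

def reconstruct_lineage_alt (addr : Int) (p : Int) : List Int :=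
  let val := addr - 1
  if val ≤ 0 then [1]
  else 1 :: pvBLoop val (PySem.Int.mod val p) p (val.toNat + 1) 1

-- ===== PRECONDITION & SPEC =====
-- Pre_ excludes only inputs on which A does not return: for addr > 1, p = 0 raises
-- ZeroDivisionError and p = 1 loops forever; A returns on every other input.
def Pre_reconstruct_lineage (addr : Int) (p : Int) : Prop := addr ≤ 1 ∨ (p ≠ 0 ∧ p ≠ 1)
instance (addr : Int) (p : Int) : Decidable (Pre_reconstruct_lineage addr p) := by
  unfold Pre_reconstruct_lineage; infer_instance

def pvWitness_reconstruct_lineage : Int × Int := (2405, 48)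

def Spec_reconstruct_lineage (addr : Int) (p : Int) (out : List Int) : Prop := out = reconstruct_lineage_alt addr p
instance (addr : Int) (p : Int) (out : List Int) : Decidable (Spec_reconstruct_lineage addr p out) := by unfold Spec_reconstruct_lineage; infer_instance

-- ===== CLAIM (what is proved, stated in full; the proofs are below) =====
def Claim_equal_reconstruct_lineage : Prop := ∀ (addr : Int) (p : Int), Dom_reconstruct_lineage addr p → Pre_reconstruct_lineage addr p → Spec_reconstruct_lineage addr p (reconstruct_lineage addr p)

-- ===== LEMMAS AND PROOFS =====

-- A's loop with the lineage accumulator, split into accumulator ++ pure part.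
def pvAPure (p : Int) : List Int → Nat → Int → List Int
  | [], _, _ => []
  | c :: rest, i, cur =>
    if i = 0 then pvAPure p rest (i + 1) cur
    else (cur + c * p ^ i) :: pvAPure p rest (i + 1) (cur + c * p ^ i)

theorem pvALoop_eq_append (p : Int) (cs : List Int) (i : Nat) (cur : Int) (acc : List Int) :
    pvALoop p cs i cur acc = acc ++ pvAPure p cs i cur := by
  induction cs generalizing i cur acc with
  | nil => simp [pvALoop, pvAPure]
  | cons c rest ih =>
    by_cases h : i = 0 <;> simp [pvALoop, pvAPure, h, ih]

theorem pv_fdiv_nonpos_of_neg {a b : Int} (ha : 0 < a) (hb : b < 0) :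
    PySem.Int.floordiv a b ≤ 0 := by
  have h := PySem.Int.floordiv_mul_add_mod a b
  have hm := PySem.Int.mod_neg_bounds (a := a) hb
  nlinarith [hm.1, hm.2]

-- key modular identity: val % p^(i+1) = val % p^i + ((val // p^i) % p) * p^i  (0 ≤ val, 2 ≤ p)
theorem pv_mod_pow_succ (val p : Int) (i : Nat) (hv : 0 ≤ val) (hp : 2 ≤ p) :
    PySem.Int.mod val (p ^ (i + 1)) =
      PySem.Int.mod val (p ^ i) + PySem.Int.mod (PySem.Int.floordiv val (p ^ i)) p * p ^ i := by
  have hpi : (0:Int) < p ^ i := pow_pos (by omega) i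
  have hpsi : (0:Int) < p ^ (i + 1) := pow_pos (by omega) (i + 1)
  rw [PySem.Int.mod_eq_emod_of_pos hpsi, PySem.Int.mod_eq_emod_of_pos hpi,
    PySem.Int.floordiv_eq_ediv_of_pos hpi, PySem.Int.mod_eq_emod_of_pos (by omega : (0:Int) < p)]
  -- pass to Nat
  obtain ⟨n, rfl⟩ := Int.eq_ofNat_of_zero_le hv
  obtain ⟨q, rfl⟩ := Int.eq_ofNat_of_zero_le (by omega : (0:Int) ≤ p)
  have h2 : n % (q ^ i * q) = n % q ^ i + n / q ^ i % q * q ^ i := by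
    rw [Nat.mod_mul]; ring
  rw [pow_succ]
  exact_mod_cast h2

theorem pv_ediv_lt (w p : Int) (hw : 0 < w) (hp : 2 ≤ p) : w / p < w := by
  obtain ⟨m, rfl⟩ := Int.eq_ofNat_of_zero_le hw.le
  obtain ⟨q, rfl⟩ := Int.eq_ofNat_of_zero_le (by omega : (0:Int) ≤ p)
  have : m / q < m := Nat.div_lt_self (by exact_mod_cast hw) (by exact_mod_cast hp)
  exact_mod_cast this

theorem pv_main (p val : Int) (hp : 2 ≤ p) (hv : 0 < val) :
    ∀ (fa fb i : Nat), ∀ (w cur : Int),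
      1 ≤ i → w = PySem.Int.floordiv val (p ^ i) →
      cur = 1 - PySem.Int.mod val p + PySem.Int.mod val (p ^ i) →
      w.toNat < fa → w.toNat < fb →
      pvAPure p (pvDigitsA p fa w) i cur = pvBLoop val (PySem.Int.mod val p) p fb i := by
  intro fa
  induction fa with
  | zero => intro fb i w cur _ _ _ hfa _; omega
  | succ fa ih =>
    intro fb i w cur hi hw hcur hfa hfb
    obtain ⟨fb', rfl⟩ : ∃ fb', fb = fb' + 1 := ⟨fb - 1, by omega⟩
    have hpi : (0:Int) < p ^ i := pow_pos (by omega) i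
    have hwd : w = val / p ^ i := by rw [hw, PySem.Int.floordiv_eq_ediv_of_pos hpi]
    have hw0 : 0 ≤ w := hwd ▸ Int.ediv_nonneg hv.le hpi.le
    by_cases hwpos : 0 < w
    · -- loop body fires on both sides
      have hcond : PySem.Int.floordiv val (p ^ i) > 0 := hw ▸ hwpos
      have hkey := pv_mod_pow_succ val p i hv.le hp
      have hhead : cur + PySem.Int.mod w p * p ^ i =
          1 - PySem.Int.mod val p + PySem.Int.mod val (p ^ (i + 1)) := by
        rw [hcur, hkey, hw]; ring
      have hdd : PySem.Int.floordiv w p = PySem.Int.floordiv val (p ^ (i + 1)) := by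
        have h2 : (0:Int) < p := by omega
        have hpsi : (0:Int) < p ^ (i + 1) := pow_pos (by omega) (i + 1)
        rw [PySem.Int.floordiv_eq_ediv_of_pos h2, PySem.Int.floordiv_eq_ediv_of_pos hpsi,
          hwd, Int.ediv_ediv_of_nonneg hpi.le, pow_succ]
      have hlt : (PySem.Int.floordiv w p).toNat < w.toNat := by
        have h2 : (0:Int) < p := by omega
        have := pv_ediv_lt w p hwpos hp
        have hnn : 0 ≤ w / p := Int.ediv_nonneg hw0 h2.le
        rw [PySem.Int.floordiv_eq_ediv_of_pos h2]
        omega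
      simp only [pvDigitsA, pvBLoop]
      rw [if_pos hwpos, if_pos hcond]
      simp only [pvAPure]
      rw [if_neg (by omega : ¬ i = 0), hhead]
      congr 1
      exact ih fb' (i + 1) (PySem.Int.floordiv w p)
        (1 - PySem.Int.mod val p + PySem.Int.mod val (p ^ (i + 1)))
        (by omega) hdd (by ring) (by omega) (by omega)
    · -- w = 0: both loops stop
      have hw0' : w = 0 := by omega
      have hcond : ¬ PySem.Int.floordiv val (p ^ i) > 0 := by rw [← hw]; omega
      simp [pvDigitsA, pvAPure, pvBLoop, hw0', hcond]

theorem pvDigitsA_nonpos (p t : Int) (fuel : Nat) (h : t ≤ 0) : pvDigitsA p fuel t = [] := by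
  cases fuel with
  | zero => rfl
  | succ f => simp [pvDigitsA, show ¬ t > 0 by omega]

theorem reconstruct_lineage_eq (addr p : Int) (hpre : Pre_reconstruct_lineage addr p) :
    reconstruct_lineage addr p = reconstruct_lineage_alt addr p := by
  rcases lt_trichotomy (addr - 1) 0 with hv | hv | hv
  · -- val < 0 : both return [1]
    simp [reconstruct_lineage, reconstruct_lineage_alt, show ¬ addr - 1 = 0 by omega,
      show addr - 1 ≤ 0 by omega, pvDigitsA_nonpos p (addr - 1) _ (by omega), pvALoop]
  · -- val = 0 : both return [1]
    simp [reconstruct_lineage, reconstruct_lineage_alt, hv]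
  · -- val > 0
    have hne : ¬ addr - 1 = 0 := by omega
    have hle : ¬ addr - 1 ≤ 0 := by omega
    have htn : (addr - 1).toNat ≥ 1 := by omega
    obtain ⟨m, hm⟩ : ∃ m, (addr - 1).toNat = m + 1 := ⟨(addr - 1).toNat - 1, by omega⟩
    have hp01 : p ≠ 0 ∧ p ≠ 1 := by
      rcases hpre with h | h
      · exact absurd h (by omega)
      · exact h
    simp only [reconstruct_lineage, reconstruct_lineage_alt]
    rw [if_neg hne, if_neg hle]
    rw [show pvDigitsA p ((addr - 1).toNat + 1) (addr - 1) =
        PySem.Int.mod (addr - 1) p ::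
          pvDigitsA p (addr - 1).toNat (PySem.Int.floordiv (addr - 1) p) by
      simp [pvDigitsA]; omega]
    rw [pvALoop_eq_append]
    rw [show pvAPure p (PySem.Int.mod (addr - 1) p ::
          pvDigitsA p (addr - 1).toNat (PySem.Int.floordiv (addr - 1) p)) 0 1 =
        pvAPure p (pvDigitsA p (addr - 1).toNat (PySem.Int.floordiv (addr - 1) p)) 1 1 by
      simp [pvAPure]]
    rcases (by omega : 2 ≤ p ∨ p ≤ -1) with hp | hp
    · -- proper base: the two loops compute the same prefixes
      have hfd : PySem.Int.floordiv (addr - 1) p = (addr - 1) / p :=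
        PySem.Int.floordiv_eq_ediv_of_pos (by omega)
      have hdlt : (addr - 1) / p < addr - 1 := pv_ediv_lt (addr - 1) p hv hp
      have hdnn : 0 ≤ (addr - 1) / p := Int.ediv_nonneg (by omega) (by omega)
      have := pv_main p (addr - 1) hp hv (addr - 1).toNat ((addr - 1).toNat + 1) 1
        (PySem.Int.floordiv (addr - 1) p) 1 (by omega)
        (by rw [pow_one]) (by rw [pow_one]; ring)
        (by rw [hfd]; omega) (by rw [hfd]; omega)
      rw [this]
      rfl
    · -- negative base: one digit only, both sides give [1]
      have h1 : PySem.Int.floordiv (addr - 1) p ≤ 0 :=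
        pv_fdiv_nonpos_of_neg hv (by omega)
      rw [pvDigitsA_nonpos p _ _ h1]
      have h2 : ¬ PySem.Int.floordiv (addr - 1) (p ^ 1) > 0 := by rw [pow_one]; omega
      rw [show pvBLoop (addr - 1) (PySem.Int.mod (addr - 1) p) p ((addr - 1).toNat + 1) 1 = [] by
        rw [hm]; simp [pvBLoop]; omega]
      simp [pvAPure]

-- ===== VERDICT (by name: the statement is the Claim_ definition above) =====
theorem reconstruct_lineage_spec : Claim_equal_reconstruct_lineage := by
  intro addr p _ hpre
  exact reconstruct_lineage_eq addr p hpre
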